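-- pv_equiv track=rewrite | github.com/Hraef/TARS | core/voice_output_tars.py | _preprocess_text_for_tars
-- ===== SOURCE A (Python) =====
-- def _preprocess_text_for_tars(text: str) -> str:
--     """Preprocess text to make it sound more like TARS."""
--     # TARS speaks in a very measured, precise way
--     processed = text
--
--     # Add slight pauses for dramatic effect (using eSpeak markup)
--     processed = processed.replace('.', '[[slnc 200]].')  # Pause after sentences
--     processed = processed.replace(',', '[[slnc 100]],')  # Brief pause after commas
--     processed = processed.replace(':', '[[slnc 150]]:')  # Pause after colons
--
--     # Emphasize certain TARS-like phrases
--     tars_phrases = {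
--         'probability': '[[emph on]]probability[[emph off]]',
--         'percent': '[[emph on]]percent[[emph off]]',
--         'systems': '[[emph on]]systems[[emph off]]',
--         'operational': '[[emph on]]operational[[emph off]]',
--         'affirmative': '[[emph on]]affirmative[[emph off]]',
--         'negative': '[[emph on]]negative[[emph off]]',
--     }
--
--     for phrase, replacement in tars_phrases.items():
--         processed = processed.replace(phrase, replacement)
--
--     return processed
-- ===== SOURCE B (Python) =====
-- def _preprocess_text_for_tars(text: str) -> str:
--     """Preprocess text to make it sound more like TARS (single left-to-right pass)."""
--     rules = {
--         '.': '[[slnc 200]].',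
--         ',': '[[slnc 100]],',
--         ':': '[[slnc 150]]:',
--         'probability': '[[emph on]]probability[[emph off]]',
--         'percent': '[[emph on]]percent[[emph off]]',
--         'systems': '[[emph on]]systems[[emph off]]',
--         'operational': '[[emph on]]operational[[emph off]]',
--         'affirmative': '[[emph on]]affirmative[[emph off]]',
--         'negative': '[[emph on]]negative[[emph off]]',
--     }
--     out = []
--     i = 0
--     n = len(text)
--     while i < n:
--         for target, replacement in rules.items():
--             if text.startswith(target, i):
--                 out.append(replacement)
--                 i += len(target)
--                 break
--         else:
--             out.append(text[i])
--             i += 1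
--     return ''.join(out)
-- ===== Notes on version B (the rewrite author's own statement) =====
-- stated objective: alternative
-- what changed: B replaces A's nine sequential whole-string str.replace passes (each building a new intermediate string) by a single left-to-right scan that consults one combined target-to-replacement table at each position; proved exact because the targets never overlap each other and no inserted replacement re-creates a later target.
import Mathlib
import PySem

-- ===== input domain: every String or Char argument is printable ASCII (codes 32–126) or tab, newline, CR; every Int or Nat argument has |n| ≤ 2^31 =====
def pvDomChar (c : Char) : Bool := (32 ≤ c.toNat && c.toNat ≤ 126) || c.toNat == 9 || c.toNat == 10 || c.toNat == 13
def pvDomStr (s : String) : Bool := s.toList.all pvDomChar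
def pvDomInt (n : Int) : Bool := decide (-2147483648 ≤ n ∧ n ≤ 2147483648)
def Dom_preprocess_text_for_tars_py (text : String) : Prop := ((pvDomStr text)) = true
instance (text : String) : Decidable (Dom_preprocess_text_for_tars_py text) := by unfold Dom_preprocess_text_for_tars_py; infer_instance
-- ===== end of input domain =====

-- B replaces A's nine sequential whole-string .replace passes by a single left-to-right
-- scan driven by one target→replacement table (same return value; objective: alternative).

-- ===== PORT A =====
def pvTarsPhrases : PySem.Dict String String := PySem.Dict.ofList
  [("probability", "[[emph on]]probability[[emph off]]"),
   ("percent", "[[emph on]]percent[[emph off]]"),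
   ("systems", "[[emph on]]systems[[emph off]]"),
   ("operational", "[[emph on]]operational[[emph off]]"),
   ("affirmative", "[[emph on]]affirmative[[emph off]]"),
   ("negative", "[[emph on]]negative[[emph off]]")]

def preprocess_text_for_tars_py (text : String) : String :=
  let processed := text
  let processed := PySem.Str.replace processed "." "[[slnc 200]]."
  let processed := PySem.Str.replace processed "," "[[slnc 100]],"
  let processed := PySem.Str.replace processed ":" "[[slnc 150]]:"
  (PySem.Dict.items pvTarsPhrases).foldl
    (fun processed pr => PySem.Str.replace processed pr.1 pr.2) processed

-- ===== PORT B =====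
-- the combined table of Source B, as (target, replacement) character lists in the same order
def pvRules : List (List Char × List Char) :=
  [(".".toList, "[[slnc 200]].".toList),
   (",".toList, "[[slnc 100]],".toList),
   (":".toList, "[[slnc 150]]:".toList),
   ("probability".toList, "[[emph on]]probability[[emph off]]".toList),
   ("percent".toList, "[[emph on]]percent[[emph off]]".toList),
   ("systems".toList, "[[emph on]]systems[[emph off]]".toList),
   ("operational".toList, "[[emph on]]operational[[emph off]]".toList),
   ("affirmative".toList, "[[emph on]]affirmative[[emph off]]".toList),
   ("negative".toList, "[[emph on]]negative[[emph off]]".toList)]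

-- the while-loop of Source B: at each position try the rules in table order; on a match emit the
-- replacement and skip the target, otherwise copy one character
def pvScan (rules : List (List Char × List Char)) : List Char → List Char
  | [] => []
  | c :: t =>
    match rules.find? (fun pr => pr.1.isPrefixOf (c :: t)) with
    | some pr => pr.2 ++ pvScan rules (List.drop (pr.1.length - 1) t)
    | none => c :: pvScan rules t
termination_by s => s.length
decreasing_by
  all_goals simp

def preprocess_text_for_tars_py_alt (text : String) : String :=
  String.ofList (pvScan pvRules text.toList)

-- ===== PRECONDITION & SPEC =====
def Spec_preprocess_text_for_tars_py (text : String) (out : String) : Prop := out = preprocess_text_for_tars_py_alt text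
instance (text : String) (out : String) : Decidable (Spec_preprocess_text_for_tars_py text out) := by unfold Spec_preprocess_text_for_tars_py; infer_instance

-- ===== CLAIM (what is proved, stated in full; the proofs are below) =====
def Claim_equal_preprocess_text_for_tars_py : Prop := ∀ (text : String), Dom_preprocess_text_for_tars_py text → Spec_preprocess_text_for_tars_py text (preprocess_text_for_tars_py text)

-- ===== LEMMAS AND PROOFS =====

-- A single Python str.replace as a leftmost non-overlapping scan (proof-side normal form of A)
def pvRep (old new : List Char) : List Char → List Char
  | [] => []
  | c :: t =>
    if old.isPrefixOf (c :: t) then new ++ pvRep old new (List.drop (old.length - 1) t)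
    else c :: pvRep old new t
termination_by s => s.length
decreasing_by
  all_goals simp

-- separation: no nonempty suffix of q is prefix-comparable with p
def pvSepB (p q : List Char) : Bool :=
  q.tails.all (fun v => v.isEmpty || (!(p.isPrefixOf v) && !(v.isPrefixOf p)))

-- conditions between an earlier rule p and a later rule q that make the passes commute
abbrev pvC (p q : List Char × List Char) : Prop :=
  pvSepB p.1 q.1 = true ∧ pvSepB p.2 q.1 = true ∧ pvSepB q.1 p.2 = true

def pvSeqRep (rules : List (List Char × List Char)) (s : List Char) : List Char :=
  rules.foldl (fun acc pr => pvRep pr.1 pr.2 acc) s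

lemma pvScan_cons_some {R : List (List Char × List Char)} {c : Char} {t : List Char}
    {pr : List Char × List Char}
    (h : List.find? (fun pr => pr.1.isPrefixOf (c :: t)) R = some pr) :
    pvScan R (c :: t) = pr.2 ++ pvScan R (List.drop (pr.1.length - 1) t) := by
  rw [pvScan, h]

lemma pvScan_cons_none {R : List (List Char × List Char)} {c : Char} {t : List Char}
    (h : List.find? (fun pr => pr.1.isPrefixOf (c :: t)) R = none) :
    pvScan R (c :: t) = c :: pvScan R t := by
  rw [pvScan, h]

lemma pvRep_cons_pos {old new : List Char} {c : Char} {t : List Char}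
    (h : old.isPrefixOf (c :: t) = true) :
    pvRep old new (c :: t) = new ++ pvRep old new (List.drop (old.length - 1) t) := by
  rw [pvRep, if_pos h]

lemma pvRep_cons_neg {old new : List Char} {c : Char} {t : List Char}
    (h : ¬ old.isPrefixOf (c :: t) = true) :
    pvRep old new (c :: t) = c :: pvRep old new t := by
  rw [pvRep, if_neg h]

lemma pvSep_spec {p q v : List Char} (h : pvSepB p q = true) (hv : v <:+ q) (hne : v ≠ []) :
    ¬ p <+: v ∧ ¬ v <+: p := by
  have hh := List.all_eq_true.mp h v ((List.mem_tails v q).mpr hv)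
  simp only [List.isEmpty_iff, Bool.or_eq_true, Bool.and_eq_true, Bool.not_eq_true'] at hh
  rcases hh with hh | hh
  · exact absurd hh hne
  · obtain ⟨h1, h2⟩ := hh
    exact ⟨fun hc => absurd (List.isPrefixOf_iff_prefix.mpr hc) (by simp [h1]),
           fun hc => absurd (List.isPrefixOf_iff_prefix.mpr hc) (by simp [h2])⟩

lemma pvSep_nomatch {p q v u : List Char} (h : pvSepB p q = true) (hv : v <:+ q) (hne : v ≠ []) :
    ¬ p <+: (v ++ u) := by
  intro hp
  obtain ⟨h1, h2⟩ := pvSep_spec h hv hne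
  rcases List.prefix_or_prefix_of_prefix hp (List.prefix_append v u) with h' | h'
  · exact h1 h'
  · exact h2 h'

lemma pvSepB_of_suffix {p q q' : List Char} (h : pvSepB p q = true) (hs : q' <:+ q) :
    pvSepB p q' = true := by
  refine List.all_eq_true.mpr fun v hv => ?_
  exact List.all_eq_true.mp h v ((List.mem_tails v q).mpr (((List.mem_tails v q').mp hv).trans hs))

-- push-through: a replace pass for t walks over a block w it cannot match into
lemma pvRep_push {t r w : List Char} (h : pvSepB t w = true) (u : List Char) :
    pvRep t r (w ++ u) = w ++ pvRep t r u := by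
  induction w with
  | nil => simp
  | cons c w' ih =>
    have hnm : ¬ t <+: ((c :: w') ++ u) :=
      pvSep_nomatch h (List.suffix_refl _) (by simp)
    rw [List.cons_append, pvRep, if_neg (by simpa [List.isPrefixOf_iff_prefix] using hnm)]
    rw [ih (pvSepB_of_suffix h (List.suffix_cons c w'))]
    simp

-- the scan copies a region that matches a pending target t untouched: no rule of R can fire inside it
lemma pvScan_copy {R : List (List Char × List Char)} {t : List Char}
    (hR : ∀ pr ∈ R, pvSepB pr.1 t = true) :
    ∀ v s, v <:+ t → v <+: s → pvScan R s = v ++ pvScan R (List.drop v.length s) := by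
  intro v
  induction v with
  | nil => intro s _ _; simp
  | cons c v' ih =>
    intro s hsuf hpre
    obtain ⟨u, rfl⟩ := hpre
    have hfind : List.find? (fun pr => pr.1.isPrefixOf (c :: (v' ++ u))) R = none := by
      apply List.find?_eq_none.mpr
      intro pr hpr
      simp only [Bool.not_eq_true]
      rw [← Bool.not_eq_true, List.isPrefixOf_iff_prefix]
      exact pvSep_nomatch (p := pr.1) (hR pr hpr) hsuf (List.cons_ne_nil c v')
    rw [List.cons_append, pvScan_cons_none hfind,
        ih (v' ++ u) ((List.suffix_cons c v').trans hsuf) (List.prefix_append v' u)]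
    simp

-- no pending suffix of t becomes a prefix of the scanned string if it was not one before
lemma pvScan_noprefix {R : List (List Char × List Char)} {t : List Char}
    (hR : ∀ pr ∈ R, pvSepB pr.2 t = true) :
    ∀ s v, v <:+ t → v ≠ [] → ¬ v <+: s → ¬ v <+: pvScan R s := by
  intro s
  induction s with
  | nil => intro v _ hne _ hc; simp [pvScan] at hc; exact hne hc
  | cons c s₀ ih =>
    intro v hsuf hne hnp hcontra
    cases hfind : List.find? (fun pr => pr.1.isPrefixOf (c :: s₀)) R with
    | some pr =>
      rw [pvScan_cons_some hfind] at hcontra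
      obtain ⟨h1, h2⟩ := pvSep_spec (hR pr (List.mem_of_find?_eq_some hfind)) hsuf hne
      rcases List.prefix_or_prefix_of_prefix hcontra (List.prefix_append pr.2 _) with h | h
      · exact h2 h
      · exact h1 h
    | none =>
      rw [pvScan_cons_none hfind] at hcontra
      cases v with
      | nil => exact hne rfl
      | cons d v' =>
        obtain ⟨rfl, hv'⟩ := List.cons_prefix_cons.mp hcontra
        cases hv'e : v' with
        | nil =>
          exact hnp (by simp [hv'e])
        | cons e v'' =>
          refine ih v' ((List.suffix_cons d v').trans hsuf) (by simp [hv'e]) ?_ hv'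
          intro hcon
          exact hnp (List.cons_prefix_cons.mpr ⟨rfl, hcon⟩)

-- one more sequential replace pass over the scanned string = the scan with the rule appended
lemma pvStep {R : List (List Char × List Char)} {t r : List Char} (ht : t ≠ [])
    (h1 : ∀ pr ∈ R, pvSepB pr.1 t = true)
    (h2 : ∀ pr ∈ R, pvSepB pr.2 t = true)
    (h3 : ∀ pr ∈ R, pvSepB t pr.2 = true)
    (s : List Char) : pvRep t r (pvScan R s) = pvScan (R ++ [(t, r)]) s := by
  cases s with
  | nil => simp [pvScan, pvRep]
  | cons c s₀ =>
    cases hfind : List.find? (fun pr => pr.1.isPrefixOf (c :: s₀)) R with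
    | some pr =>
      have hmem := List.mem_of_find?_eq_some hfind
      have hfind' : List.find? (fun pr => pr.1.isPrefixOf (c :: s₀)) (R ++ [(t, r)]) =
          some pr := by rw [List.find?_append, hfind]; rfl
      rw [pvScan_cons_some hfind, pvRep_push (h3 pr hmem),
          pvStep ht h1 h2 h3 (List.drop (pr.1.length - 1) s₀), pvScan_cons_some hfind']
    | none =>
      by_cases hp : t <+: (c :: s₀)
      · have hcopy := pvScan_copy h1 t (c :: s₀) (List.suffix_refl t) hp
        rw [hcopy]
        obtain ⟨d, t₀, rfl⟩ : ∃ d t₀, t = d :: t₀ := by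
          cases t with
          | nil => exact absurd rfl ht
          | cons d t₀ => exact ⟨d, t₀, rfl⟩
        rw [List.cons_append, pvRep_cons_pos (by
          rw [List.isPrefixOf_iff_prefix]
          exact List.cons_prefix_cons.mpr ⟨rfl, List.prefix_append t₀ _⟩)]
        have h4 : List.drop ((d :: t₀).length - 1)
            (t₀ ++ pvScan R (List.drop (d :: t₀).length (c :: s₀))) =
            pvScan R (List.drop (d :: t₀).length (c :: s₀)) := by simp
        rw [h4, pvStep ht h1 h2 h3 (List.drop (d :: t₀).length (c :: s₀))]
        have hfind' : List.find? (fun pr => pr.1.isPrefixOf (c :: s₀)) (R ++ [(d :: t₀, r)]) =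
            some (d :: t₀, r) := by
          rw [List.find?_append, hfind]
          simp [List.isPrefixOf_iff_prefix, hp]
        rw [pvScan_cons_some hfind']
        simp
      · have hnop : ¬ t <+: pvScan R (c :: s₀) :=
          pvScan_noprefix h2 (c :: s₀) t (List.suffix_refl t) ht hp
        have hfind' : List.find? (fun pr => pr.1.isPrefixOf (c :: s₀)) (R ++ [(t, r)]) =
            none := by
          rw [List.find?_append, hfind]
          simp [List.isPrefixOf_iff_prefix, hp]
        rw [pvScan_cons_none hfind] at hnop ⊢
        rw [pvRep_cons_neg (by rw [List.isPrefixOf_iff_prefix]; exact hnop),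
            pvStep ht h1 h2 h3 s₀, pvScan_cons_none hfind']
termination_by s.length
decreasing_by
  all_goals simp

lemma pvScan_nil : ∀ s, pvScan [] s = s := by
  intro s
  induction s with
  | nil => simp [pvScan]
  | cons c t ih => rw [pvScan_cons_none (by simp), ih]

-- folding the remaining replace passes into the scan, one rule at a time
lemma pvChain : ∀ (R₂ R₁ : List (List Char × List Char)),
    (∀ q ∈ R₂, q.1 ≠ []) → (∀ p ∈ R₁, ∀ q ∈ R₂, pvC p q) → List.Pairwise pvC R₂ →
    ∀ s, pvSeqRep R₂ (pvScan R₁ s) = pvScan (R₁ ++ R₂) s := by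
  intro R₂
  induction R₂ with
  | nil => intro R₁ _ _ _ s; simp [pvSeqRep]
  | cons q R₂' ih =>
    intro R₁ hne hcross hpw s
    obtain ⟨t, r⟩ := q
    obtain ⟨hq, hpw'⟩ := List.pairwise_cons.mp hpw
    have hstep := pvStep (R := R₁) (r := r) (hne (t, r) List.mem_cons_self)
      (fun pr hpr => (hcross pr hpr (t, r) List.mem_cons_self).1)
      (fun pr hpr => (hcross pr hpr (t, r) List.mem_cons_self).2.1)
      (fun pr hpr => (hcross pr hpr (t, r) List.mem_cons_self).2.2) s
    have : pvSeqRep ((t, r) :: R₂') (pvScan R₁ s) =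
        pvSeqRep R₂' (pvRep t r (pvScan R₁ s)) := rfl
    rw [this, hstep, ih (R₁ ++ [(t, r)])
      (fun q' hq' => hne q' (List.mem_cons_of_mem _ hq'))
      (by
        intro p hp q' hq'
        rcases List.mem_append.mp hp with h | h
        · exact hcross p h q' (List.mem_cons_of_mem _ hq')
        · simp at h; subst h; exact hq q' hq')
      hpw' s]
    simp

-- Python str.replace (nonempty pattern) is the leftmost non-overlapping pass pvRep
lemma pvGo_eq (old new : List Char) (hold : old ≠ []) :
    ∀ fuel l acc, l.length ≤ fuel →
      PySem.Chars.replace.go old new fuel l acc = acc.reverse ++ pvRep old new l := by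
  intro fuel
  induction fuel with
  | zero =>
    intro l acc hl
    have : l = [] := List.length_eq_zero_iff.mp (Nat.le_zero.mp hl)
    subst this; simp [PySem.Chars.replace.go, pvRep]
  | succ n ihf =>
    intro l acc hl
    cases l with
    | nil => simp [PySem.Chars.replace.go, pvRep]
    | cons c t =>
      rw [PySem.Chars.replace.go]
      by_cases hpre : old.isPrefixOf (c :: t) = true
      · rw [if_pos hpre, pvRep, if_pos hpre]
        have hdrop : List.drop old.length (c :: t) = List.drop (old.length - 1) t := by
          cases old with
          | nil => exact absurd rfl hold
          | cons o os => simp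
        rw [hdrop, ihf _ _ (by simp at hl ⊢; omega)]
        simp
      · rw [if_neg hpre, pvRep, if_neg hpre, ihf _ _ (by simp at hl ⊢; omega)]
        simp

lemma pvStrReplace (s o n : String) (h : o.toList ≠ []) :
    (PySem.Str.replace s o n).toList = pvRep o.toList n.toList s.toList := by
  rw [PySem.Str.toList_replace, PySem.Chars.replace,
      if_neg (by simpa [List.isEmpty_iff] using h),
      pvGo_eq o.toList n.toList h s.toList.length s.toList [] (Nat.le_refl _)]
  simp

-- A's port, normalised to the nine-pass pvSeqRep over the combined rule list
lemma pvA_toList (text : String) :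
    (preprocess_text_for_tars_py text).toList = pvSeqRep pvRules text.toList := by
  have hitems : PySem.Dict.items pvTarsPhrases =
    [("probability", "[[emph on]]probability[[emph off]]"),
     ("percent", "[[emph on]]percent[[emph off]]"),
     ("systems", "[[emph on]]systems[[emph off]]"),
     ("operational", "[[emph on]]operational[[emph off]]"),
     ("affirmative", "[[emph on]]affirmative[[emph off]]"),
     ("negative", "[[emph on]]negative[[emph off]]")] := by decide
  simp only [preprocess_text_for_tars_py, hitems, List.foldl, pvSeqRep, pvRules]
  rw [pvStrReplace _ "negative" _ (by decide), pvStrReplace _ "affirmative" _ (by decide),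
      pvStrReplace _ "operational" _ (by decide), pvStrReplace _ "systems" _ (by decide),
      pvStrReplace _ "percent" _ (by decide), pvStrReplace _ "probability" _ (by decide),
      pvStrReplace _ ":" _ (by decide), pvStrReplace _ "," _ (by decide),
      pvStrReplace _ "." _ (by decide)]

-- ===== VERDICT (by name: the statement is the Claim_ definition above) =====
theorem preprocess_text_for_tars_py_spec : Claim_equal_preprocess_text_for_tars_py := by
  intro text _
  unfold Spec_preprocess_text_for_tars_py
  apply String.toList_inj.mp
  rw [pvA_toList, preprocess_text_for_tars_py_alt, String.toList_ofList]
  have := pvChain pvRules [] (by decide) (by intro p hp; simp at hp) (by decide) text.toList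
  rw [pvScan_nil] at this
  simpa using this
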